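-- pv_equiv track=rewrite | github.com/ECIProjects/CNYT-Tarea-5 | Deutsch-Jozsa's Functions.py | ReverseFirstQuarter
-- ===== SOURCE A (Python) =====
-- def ReverseFirstQuarter(n):
--     matrix = [[0 for k in range(n)] for l in range(n)]
--     for i in range(0, (n//2), 2):
--         matrix[i][i+1] = 1
--         matrix[i+1][i] = 1
--     for n in range((n//2), n):
--         matrix[n][n] = 1
--     return matrix
-- ===== SOURCE B (Python) =====
-- def ReverseFirstQuarter(n):
--     # Sparse construction: for each row list its few one-columns, then expand
--     # that sorted column list into a dense row by run-length filling zeros.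
--     h = n // 2
--     out = []
--     for r in range(n):
--         cols = []
--         if r % 2 == 1 and r - 1 < h:
--             cols.append(r - 1)
--         if r >= h:
--             cols.append(r)
--         if r % 2 == 0 and r < h:
--             cols.append(r + 1)
--         row = []
--         prev = 0
--         for c in cols:
--             row.extend([0] * (c - prev))
--             row.append(1)
--             prev = c + 1
--         row.extend([0] * (n - prev))
--         out.append(row)
--     return out
-- ===== Notes on version B (the rewrite author's own statement) =====
-- stated objective: alternative
-- what changed: Instead of allocating a dense zero matrix and mutating the few nonzero entries in place, B builds each row sparsely: it lists the row's one-columns (at most two) and expands that sorted column list into the dense row by run-length filling zeros.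
import Mathlib
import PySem

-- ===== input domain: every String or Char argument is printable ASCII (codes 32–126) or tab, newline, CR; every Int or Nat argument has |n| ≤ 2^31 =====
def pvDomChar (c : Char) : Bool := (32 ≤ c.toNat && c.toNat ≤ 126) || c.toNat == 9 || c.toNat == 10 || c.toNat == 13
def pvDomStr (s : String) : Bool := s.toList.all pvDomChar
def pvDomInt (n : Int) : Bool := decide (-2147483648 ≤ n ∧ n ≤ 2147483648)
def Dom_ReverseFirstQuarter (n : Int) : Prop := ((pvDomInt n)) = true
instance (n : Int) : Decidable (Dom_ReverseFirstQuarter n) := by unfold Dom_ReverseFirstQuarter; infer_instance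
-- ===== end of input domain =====

-- B replaces A's dense zero-matrix + sparse in-place mutation by a sparse row build:
-- each row's few one-columns are listed, then expanded by run-length zero filling
-- (objective: alternative; same O(n^2) total cost).

-- ===== PORT A =====
-- helper: the loop body 'matrix[i][i+1] = 1; matrix[i+1][i] = 1' (in-place row update)
def pvSwapStep (m : List (List Int)) (i : Int) : List (List Int) :=
  PySem.List.pySetD
    (PySem.List.pySetD m i (PySem.List.pySetD (PySem.List.pyGetD m i []) (i + 1) 1))
    (i + 1)
    (PySem.List.pySetD
      (PySem.List.pyGetD
        (PySem.List.pySetD m i (PySem.List.pySetD (PySem.List.pyGetD m i []) (i + 1) 1))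
        (i + 1) [])
      i 1)

-- helper: the loop body 'matrix[n][n] = 1'
def pvDiagStep (m : List (List Int)) (j : Int) : List (List Int) :=
  PySem.List.pySetD m j (PySem.List.pySetD (PySem.List.pyGetD m j []) j 1)

def ReverseFirstQuarter (n : Int) : List (List Int) :=
  let matrix := (PySem.List.pyRange 0 n 1).map
    (fun _l => (PySem.List.pyRange 0 n 1).map (fun _k => (0 : Int)))
  let matrix := (PySem.List.pyRange 0 (PySem.Int.floordiv n 2) 2).foldl pvSwapStep matrix
  (PySem.List.pyRange (PySem.Int.floordiv n 2) n 1).foldl pvDiagStep matrix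

-- ===== PORT B =====
-- helper: the three conditional appends building row r's list of one-columns
def pvColsB (h r : Int) : List Int :=
  let cols : List Int := []
  let cols := if PySem.Int.mod r 2 = 1 ∧ r - 1 < h then cols ++ [r - 1] else cols
  let cols := if h ≤ r then cols ++ [r] else cols
  if PySem.Int.mod r 2 = 0 ∧ r < h then cols ++ [r + 1] else cols

-- helper: the inner loop body 'row.extend([0]*(c-prev)); row.append(1); prev = c+1'
def pvFillStep (s : List Int × Int) (c : Int) : List Int × Int :=
  (s.1 ++ List.replicate (c - s.2).toNat 0 ++ [1], c + 1)

-- helper: build row r by run-length expanding its sorted one-column list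
def pvRowB (n h r : Int) : List Int :=
  let s := (pvColsB h r).foldl pvFillStep ([], 0)
  s.1 ++ List.replicate (n - s.2).toNat 0

def ReverseFirstQuarter_alt (n : Int) : List (List Int) :=
  let h := PySem.Int.floordiv n 2
  (PySem.List.pyRange 0 n 1).foldl (fun out r => out ++ [pvRowB n h r]) []

-- ===== PRECONDITION & SPEC =====
def Spec_ReverseFirstQuarter (n : Int) (out : List (List Int)) : Prop := out = ReverseFirstQuarter_alt n
instance (n : Int) (out : List (List Int)) : Decidable (Spec_ReverseFirstQuarter n out) := by unfold Spec_ReverseFirstQuarter; infer_instance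

-- ===== CLAIM (what is proved, stated in full; the proofs are below) =====
def Claim_equal_ReverseFirstQuarter : Prop := ∀ (n : Int), Dom_ReverseFirstQuarter n → Spec_ReverseFirstQuarter n (ReverseFirstQuarter n)

-- ===== LEMMAS AND PROOFS =====

def pvCell (m : List (List Int)) (r c : Nat) : Int := (m.getD r []).getD c 0

def pvShape (m : List (List Int)) (N : Nat) : Prop :=
  m.length = N ∧ ∀ row ∈ m, row.length = N

theorem pvShape_set (m : List (List Int)) (N a : Nat) (v : List Int)
    (hS : pvShape m N) (hv : v.length = N) : pvShape (m.set a v) N := by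
  obtain ⟨h1, h2⟩ := hS
  refine ⟨by simp [h1], ?_⟩
  intro row hrow
  rcases List.mem_or_eq_of_mem_set hrow with h | h
  · exact h2 _ h
  · simpa [h] using hv

theorem pvShape_row (m : List (List Int)) (N a : Nat) (hS : pvShape m N) (ha : a < N) :
    (m.getD a []).length = N := by
  obtain ⟨h1, h2⟩ := hS
  rw [List.getD_eq_getElem?_getD, List.getElem?_eq_getElem (by omega), Option.getD_some]
  exact h2 _ (List.getElem_mem _)

theorem pvCell_set (m : List (List Int)) (a b r c : Nat)
    (ha : a < m.length) (hb : b < (m.getD a []).length) :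
    pvCell (m.set a ((m.getD a []).set b 1)) r c
      = if r = a ∧ c = b then 1 else pvCell m r c := by
  have hb' : b < m[a].length := by
    rw [List.getD_eq_getElem?_getD, List.getElem?_eq_getElem ha, Option.getD_some] at hb
    exact hb
  by_cases hra : r = a
  · subst hra
    by_cases hcb : c = b
    · subst hcb
      simp [pvCell, List.getD_eq_getElem?_getD, List.getElem?_set, ha, hb']
    · simp [pvCell, List.getD_eq_getElem?_getD, List.getElem?_set, ha, hb, hcb, Ne.symm hcb]
  · simp [pvCell, List.getD_eq_getElem?_getD, List.getElem?_set, hra, Ne.symm hra]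

theorem pvSwapStep_char (m : List (List Int)) (N : Nat) (i : Int)
    (hS : pvShape m N) (h0 : 0 ≤ i) (h1 : i + 1 < (N : Int)) :
    pvShape (pvSwapStep m i) N ∧
      ∀ r c : Nat, pvCell (pvSwapStep m i) r c
        = if ((r : Int) = i ∧ (c : Int) = i + 1) ∨ ((r : Int) = i + 1 ∧ (c : Int) = i)
          then 1 else pvCell m r c := by
  obtain ⟨hlen, hrows⟩ := hS
  set a := i.toNat with hadef
  have hia : (a : Int) = i := Int.toNat_of_nonneg h0
  have hi1 : (i + 1).toNat = a + 1 := by omega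
  have haN : a + 1 < N := by omega
  have hrowa : (m.getD a []).length = N := pvShape_row m N a ⟨hlen, hrows⟩ (by omega)
  have hm1 : pvSwapStep m i
      = (m.set a ((m.getD a []).set (a+1) 1)).set (a+1)
          (((m.set a ((m.getD a []).set (a+1) 1)).getD (a+1) []).set a 1) := by
    unfold pvSwapStep
    rw [PySem.List.pyGetD_of_nonneg _ _ h0, PySem.List.pySetD_of_nonneg _ _ h0,
        PySem.List.pyGetD_of_nonneg _ _ (by omega : (0:Int) ≤ i + 1),
        PySem.List.pySetD_of_nonneg _ _ (by omega : (0:Int) ≤ i + 1),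
        PySem.List.pySetD_of_nonneg _ _ (by omega : (0:Int) ≤ i + 1),
        PySem.List.pySetD_of_nonneg _ _ h0, hi1, hadef]
  have hS1 : pvShape (m.set a ((m.getD a []).set (a+1) 1)) N :=
    pvShape_set _ _ _ _ ⟨hlen, hrows⟩ (by rw [List.length_set, hrowa])
  have hrowa1 : ((m.set a ((m.getD a []).set (a+1) 1)).getD (a+1) []).length = N :=
    pvShape_row _ N (a+1) hS1 haN
  constructor
  · rw [hm1]
    exact pvShape_set _ _ _ _ hS1 (by rw [List.length_set, hrowa1])
  · intro r c
    rw [hm1]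
    rw [pvCell_set _ _ _ _ _ (by simp [hlen]; omega) (by rw [hrowa1]; omega)]
    rw [pvCell_set _ _ _ _ _ (by omega) (by omega)]
    have e1 : ((r : Int) = i + 1 ∧ (c : Int) = i) ↔ (r = a + 1 ∧ c = a) := by omega
    have e2 : ((r : Int) = i ∧ (c : Int) = i + 1) ↔ (r = a ∧ c = a + 1) := by omega
    by_cases p1 : r = a + 1 ∧ c = a
    · rw [if_pos p1, if_pos (Or.inr (e1.mpr p1))]
    · by_cases p2 : r = a ∧ c = a + 1
      · rw [if_neg p1, if_pos p2, if_pos (Or.inl (e2.mpr p2))]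
      · rw [if_neg p1, if_neg p2, if_neg]
        rintro (h | h)
        · exact p2 (e2.mp h)
        · exact p1 (e1.mp h)

theorem pvDiagStep_char (m : List (List Int)) (N : Nat) (j : Int)
    (hS : pvShape m N) (h0 : 0 ≤ j) (h1 : j < (N : Int)) :
    pvShape (pvDiagStep m j) N ∧
      ∀ r c : Nat, pvCell (pvDiagStep m j) r c
        = if ((r : Int) = j ∧ (c : Int) = j) then 1 else pvCell m r c := by
  obtain ⟨hlen, hrows⟩ := hS
  set a := j.toNat with hadef
  have hrowa : (m.getD a []).length = N := pvShape_row m N a ⟨hlen, hrows⟩ (by omega)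
  have hm1 : pvDiagStep m j = m.set a ((m.getD a []).set a 1) := by
    unfold pvDiagStep
    rw [PySem.List.pyGetD_of_nonneg _ _ h0, PySem.List.pySetD_of_nonneg _ _ h0,
        PySem.List.pySetD_of_nonneg _ _ h0, hadef]
  constructor
  · rw [hm1]; exact pvShape_set _ _ _ _ ⟨hlen, hrows⟩ (by rw [List.length_set, hrowa])
  · intro r c
    rw [hm1, pvCell_set _ _ _ _ _ (by omega) (by rw [hrowa]; omega)]
    have e1 : ((r : Int) = j ∧ (c : Int) = j) ↔ (r = a ∧ c = a) := by omega
    by_cases p1 : r = a ∧ c = a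
    · rw [if_pos p1, if_pos (e1.mpr p1)]
    · rw [if_neg p1, if_neg (fun h => p1 (e1.mp h))]

theorem pvSwap_fold (L : List Int) (N : Nat)
    (hmem : ∀ i ∈ L, 0 ≤ i ∧ i + 1 < (N : Int)) :
    ∀ m : List (List Int), pvShape m N →
    pvShape (L.foldl pvSwapStep m) N ∧
      ∀ r c : Nat, pvCell (L.foldl pvSwapStep m) r c
        = if (∃ i ∈ L, ((r : Int) = i ∧ (c : Int) = i + 1) ∨ ((r : Int) = i + 1 ∧ (c : Int) = i))
          then 1 else pvCell m r c := by
  induction L with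
  | nil =>
    intro m hS
    refine ⟨hS, fun r c => ?_⟩
    simp
  | cons hd tl ih =>
    intro m hS
    obtain ⟨hhd0, hhd1⟩ := hmem hd (by simp)
    obtain ⟨hS', hcell'⟩ := pvSwapStep_char m N hd hS hhd0 hhd1
    obtain ⟨hS'', hcell''⟩ := ih (fun i hi => hmem i (by simp [hi])) (pvSwapStep m hd) hS'
    refine ⟨by simpa using hS'', ?_⟩
    intro r c
    rw [List.foldl_cons] at *
    rw [hcell'' r c, hcell' r c]
    by_cases ht : ∃ i ∈ tl, ((r : Int) = i ∧ (c : Int) = i + 1) ∨ ((r : Int) = i + 1 ∧ (c : Int) = i)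
    · simp only [if_pos ht]
      rw [if_pos]
      obtain ⟨i, hi, h⟩ := ht
      exact ⟨i, by simp [hi], h⟩
    · simp only [if_neg ht]
      by_cases hh : ((r : Int) = hd ∧ (c : Int) = hd + 1) ∨ ((r : Int) = hd + 1 ∧ (c : Int) = hd)
      · rw [if_pos hh, if_pos ⟨hd, by simp, hh⟩]
      · rw [if_neg hh, if_neg]
        rintro ⟨i, hi, h⟩
        rcases List.mem_cons.mp hi with h' | h'
        · exact hh (h' ▸ h)
        · exact ht ⟨i, h', h⟩

theorem pvDiag_fold (L : List Int) (N : Nat)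
    (hmem : ∀ j ∈ L, 0 ≤ j ∧ j < (N : Int)) :
    ∀ m : List (List Int), pvShape m N →
    pvShape (L.foldl pvDiagStep m) N ∧
      ∀ r c : Nat, pvCell (L.foldl pvDiagStep m) r c
        = if (∃ j ∈ L, (r : Int) = j ∧ (c : Int) = j) then 1 else pvCell m r c := by
  induction L with
  | nil =>
    intro m hS
    refine ⟨hS, fun r c => ?_⟩
    simp
  | cons hd tl ih =>
    intro m hS
    obtain ⟨hhd0, hhd1⟩ := hmem hd (by simp)
    obtain ⟨hS', hcell'⟩ := pvDiagStep_char m N hd hS hhd0 hhd1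
    obtain ⟨hS'', hcell''⟩ := ih (fun j hj => hmem j (by simp [hj])) (pvDiagStep m hd) hS'
    refine ⟨by simpa using hS'', ?_⟩
    intro r c
    rw [List.foldl_cons] at *
    rw [hcell'' r c, hcell' r c]
    by_cases ht : ∃ j ∈ tl, (r : Int) = j ∧ (c : Int) = j
    · simp only [if_pos ht]
      rw [if_pos]
      obtain ⟨j, hj, h⟩ := ht
      exact ⟨j, by simp [hj], h⟩
    · simp only [if_neg ht]
      by_cases hh : (r : Int) = hd ∧ (c : Int) = hd
      · rw [if_pos hh, if_pos ⟨hd, by simp, hh⟩]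
      · rw [if_neg hh, if_neg]
        rintro ⟨j, hj, h⟩
        rcases List.mem_cons.mp hj with h' | h'
        · exact hh (h' ▸ h)
        · exact ht ⟨j, h', h⟩

theorem pvZero_shape (n : Int) :
    pvShape ((PySem.List.pyRange 0 n 1).map
      (fun _l => (PySem.List.pyRange 0 n 1).map (fun _k => (0 : Int)))) n.toNat := by
  constructor
  · simp [PySem.List.length_pyRange_one]
  · intro row hrow
    rcases List.mem_map.mp hrow with ⟨x, _, hx⟩
    rw [← hx]
    simp [PySem.List.length_pyRange_one]

theorem pvZero_cell (n : Int) (r c : Nat) :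
    pvCell ((PySem.List.pyRange 0 n 1).map
      (fun _l => (PySem.List.pyRange 0 n 1).map (fun _k => (0 : Int)))) r c = 0 := by
  unfold pvCell
  simp only [List.getD_eq_getElem?_getD, List.getElem?_map]
  cases h : (PySem.List.pyRange 0 n 1)[r]? with
  | none => simp [h]
  | some x =>
    simp only [h, Option.map_some, Option.getD_some, List.getElem?_map]
    cases h2 : (PySem.List.pyRange 0 n 1)[c]? <;> simp [h2]

theorem pvCell_eq_getElem (m : List (List Int)) (r c : Nat)
    (h1 : r < m.length) (hc : c < m[r].length) :
    pvCell m r c = m[r][c] := by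
  unfold pvCell
  simp [List.getD_eq_getElem?_getD, List.getElem?_eq_getElem h1, List.getElem?_eq_getElem hc]

-- ===== B-side lemmas: run-length fill characterization =====

def pvFillRec : List Int → Int → List Int
  | [], _ => []
  | c :: cs, prev => List.replicate (c - prev).toNat 0 ++ 1 :: pvFillRec cs (c + 1)

def pvLastP : List Int → Int → Int
  | [], prev => prev
  | c :: cs, _ => pvLastP cs (c + 1)

theorem pvFill_fold_eq (cols : List Int) :
    ∀ (acc : List Int) (prev : Int),
      cols.foldl pvFillStep (acc, prev) = (acc ++ pvFillRec cols prev, pvLastP cols prev) := by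
  induction cols with
  | nil => intro acc prev; simp [pvFillRec, pvLastP]
  | cons c cs ih =>
    intro acc prev
    simp only [List.foldl_cons, pvFillStep, pvFillRec, pvLastP, ih, List.append_assoc]
    simp

theorem pvLastP_lb (cols : List Int) :
    ∀ prev : Int, (∀ c ∈ cols, prev ≤ c) → cols.Pairwise (· < ·) → prev ≤ pvLastP cols prev := by
  induction cols with
  | nil => intro prev _ _; simp [pvLastP]
  | cons c cs ih =>
    intro prev hb hp
    have hc : prev ≤ c := hb c (by simp)
    have hcs : ∀ x ∈ cs, c + 1 ≤ x := fun x hx => (List.pairwise_cons.mp hp).1 x hx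
    have := ih (c + 1) hcs (List.pairwise_cons.mp hp).2
    simp only [pvLastP]
    omega

theorem pvLastP_ub (cols : List Int) :
    ∀ prev n : Int, prev ≤ n → (∀ c ∈ cols, c < n) → pvLastP cols prev ≤ n := by
  induction cols with
  | nil => intro prev n h _; simpa [pvLastP] using h
  | cons c cs ih =>
    intro prev n h hm
    simp only [pvLastP]
    exact ih (c + 1) n (by have := hm c (by simp); omega) (fun x hx => hm x (by simp [hx]))

theorem pvFillRec_length (cols : List Int) :
    ∀ prev : Int, cols.Pairwise (· < ·) → (∀ c ∈ cols, prev ≤ c) →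
      (pvFillRec cols prev).length = (pvLastP cols prev - prev).toNat := by
  induction cols with
  | nil => intro prev _ _; simp [pvFillRec, pvLastP]
  | cons c cs ih =>
    intro prev hp hb
    have hc : prev ≤ c := hb c (by simp)
    have hcs : ∀ x ∈ cs, c + 1 ≤ x := fun x hx => (List.pairwise_cons.mp hp).1 x hx
    have hlb : c + 1 ≤ pvLastP cs (c + 1) := pvLastP_lb cs (c + 1) hcs (List.pairwise_cons.mp hp).2
    simp only [pvFillRec, pvLastP, List.length_append, List.length_replicate,
      List.length_cons, ih (c + 1) (List.pairwise_cons.mp hp).2 hcs]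
    omega

theorem pvFillRec_getD (cols : List Int) :
    ∀ (prev k : Int), cols.Pairwise (· < ·) → (∀ c ∈ cols, prev ≤ c) → prev ≤ k →
      (pvFillRec cols prev).getD (k - prev).toNat 0 = if k ∈ cols then 1 else 0 := by
  induction cols with
  | nil => intro prev k _ _ _; simp [pvFillRec]
  | cons c cs ih =>
    intro prev k hp hb hk
    have hc : prev ≤ c := hb c (by simp)
    have hcs : ∀ x ∈ cs, c + 1 ≤ x := fun x hx => (List.pairwise_cons.mp hp).1 x hx
    simp only [pvFillRec]
    rcases lt_trichotomy k c with hlt | heq | hgt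
    · have hidx : (k - prev).toNat < (List.replicate (c - prev).toNat (0:Int)).length := by
        simp [List.length_replicate]; omega
      rw [List.getD_eq_getElem?_getD, List.getElem?_append_left hidx]
      have : k ∉ c :: cs := by
        simp only [List.mem_cons, not_or]
        exact ⟨by omega, fun hx => by have := hcs k hx; omega⟩
      rw [if_neg this]
      rw [List.getElem?_replicate]
      simp only [List.length_replicate] at hidx
      simp [hidx]
    · rw [List.getD_eq_getElem?_getD, List.getElem?_append_right
        (by simp only [List.length_replicate]; omega)]
      have h0 : (k - prev).toNat - (List.replicate (c - prev).toNat (0:Int)).length = 0 := by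
        simp only [List.length_replicate]; omega
      rw [h0]
      simp [heq]
    · have hlen : (List.replicate (c - prev).toNat (0:Int)).length = (c - prev).toNat := by simp
      have hge : (List.replicate (c - prev).toNat (0:Int)).length ≤ (k - prev).toNat := by
        rw [hlen]; omega
      rw [List.getD_eq_getElem?_getD, List.getElem?_append_right hge, hlen]
      have hsub : (k - prev).toNat - (c - prev).toNat = ((k - (c+1)).toNat) + 1 := by omega
      rw [hsub]
      simp only [List.getElem?_cons_succ]
      have := ih (c + 1) k (List.pairwise_cons.mp hp).2 hcs (by omega)
      rw [List.getD_eq_getElem?_getD] at this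
      rw [this]
      by_cases hm : k ∈ cs
      · rw [if_pos hm, if_pos (List.mem_cons_of_mem _ hm)]
      · rw [if_neg hm, if_neg (by simp only [List.mem_cons]; push_neg
                                  exact ⟨by omega, hm⟩)]

theorem pvGetD_append_zero_tail (front : List Int) (m i : Nat) :
    (front ++ List.replicate m 0).getD i 0 = front.getD i 0 := by
  by_cases h : i < front.length
  · rw [List.getD_eq_getElem?_getD, List.getElem?_append_left h, ← List.getD_eq_getElem?_getD]
  · rw [List.getD_eq_getElem?_getD, List.getD_eq_getElem?_getD,
        List.getElem?_append_right (Nat.le_of_not_lt h),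
        List.getElem?_eq_none (Nat.le_of_not_lt h), List.getElem?_replicate]
    by_cases h2 : i - front.length < m <;> simp [h2]

-- ===== B-side: the column-list of row r =====

theorem pvColsB_pairwise (h r : Int) : (pvColsB h r).Pairwise (· < ·) := by
  unfold pvColsB
  rw [PySem.Int.mod_eq_emod_of_pos (by norm_num)]
  split_ifs <;> simp [List.pairwise_cons] <;> omega

theorem pvColsB_mem (h r k : Int) :
    k ∈ pvColsB h r ↔
      (r % 2 = 1 ∧ r - 1 < h ∧ k = r - 1) ∨ (h ≤ r ∧ k = r) ∨
        (r % 2 = 0 ∧ r < h ∧ k = r + 1) := by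
  unfold pvColsB
  rw [PySem.Int.mod_eq_emod_of_pos (by norm_num)]
  split_ifs <;> simp [List.mem_append] <;> omega

theorem pvColsB_bounds (n h r k : Int) (hh : h = n / 2) (h0 : 0 ≤ r) (h1 : r < n)
    (hk : k ∈ pvColsB h r) : 0 ≤ k ∧ k < n := by
  rw [pvColsB_mem] at hk
  omega

theorem pvRowB_char (n h r : Int) (hh : h = n / 2) (h0 : 0 ≤ r) (h1 : r < n) :
    (pvRowB n h r).length = n.toNat ∧
      ∀ c : Nat, (pvRowB n h r).getD c 0 = if (c : Int) ∈ pvColsB h r then 1 else 0 := by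
  have hp := pvColsB_pairwise h r
  have hb : ∀ k ∈ pvColsB h r, 0 ≤ k ∧ k < n := fun k hk => pvColsB_bounds n h r k hh h0 h1 hk
  unfold pvRowB
  rw [pvFill_fold_eq]
  simp only [List.nil_append]
  constructor
  · rw [List.length_append, List.length_replicate,
      pvFillRec_length _ 0 hp (fun c hc => (hb c hc).1)]
    have hub : pvLastP (pvColsB h r) 0 ≤ n :=
      pvLastP_ub _ 0 n (by omega) (fun c hc => (hb c hc).2)
    have hlb : (0 : Int) ≤ pvLastP (pvColsB h r) 0 :=
      pvLastP_lb _ 0 (fun c hc => (hb c hc).1) hp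
    omega
  · intro c
    rw [pvGetD_append_zero_tail]
    have := pvFillRec_getD (pvColsB h r) 0 (c : Int) hp (fun x hx => (hb x hx).1)
      (by positivity)
    simpa using this

-- ===== VERDICT (by name: the statement is the Claim_ definition above) =====
theorem ReverseFirstQuarter_spec : Claim_equal_ReverseFirstQuarter := by
  unfold Claim_equal_ReverseFirstQuarter Spec_ReverseFirstQuarter
  intro n _
  set N := n.toNat with hN
  have hh : PySem.Int.floordiv n 2 = n / 2 := PySem.Int.floordiv_eq_ediv_of_pos (by norm_num)
  -- characterize A
  have hmemS : ∀ i ∈ PySem.List.pyRange 0 (PySem.Int.floordiv n 2) 2, 0 ≤ i ∧ i + 1 < (N : Int) := by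
    intro i hi
    rw [hh] at hi
    rw [PySem.List.mem_pyRange_iff_of_pos (by norm_num)] at hi
    omega
  obtain ⟨hSA1, hcellA1⟩ := pvSwap_fold _ N hmemS _ (pvZero_shape n)
  have hmemD : ∀ j ∈ PySem.List.pyRange (PySem.Int.floordiv n 2) n 1, 0 ≤ j ∧ j < (N : Int) := by
    intro j hj
    rw [hh, PySem.List.mem_pyRange_one] at hj
    omega
  obtain ⟨hSA, hcellA⟩ := pvDiag_fold _ N hmemD _ hSA1
  have hA : ReverseFirstQuarter n
      = (PySem.List.pyRange (PySem.Int.floordiv n 2) n 1).foldl pvDiagStep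
          ((PySem.List.pyRange 0 (PySem.Int.floordiv n 2) 2).foldl pvSwapStep
            ((PySem.List.pyRange 0 n 1).map
              (fun _l => (PySem.List.pyRange 0 n 1).map (fun _k => (0 : Int))))) := rfl
  rw [← hA] at hSA hcellA
  -- characterize B
  have hB : ReverseFirstQuarter_alt n
      = (PySem.List.pyRange 0 n 1).map (pvRowB n (PySem.Int.floordiv n 2)) := by
    unfold ReverseFirstQuarter_alt
    simp only
    rw [PySem.List.foldl_append_singleton_eq_map, List.nil_append]
  have hBlen : (ReverseFirstQuarter_alt n).length = N := by
    rw [hB]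
    simp [PySem.List.length_pyRange_one, hN]
  -- equality by extensionality
  apply List.ext_getElem
  · rw [hBlen, hSA.1]
  · intro r h1 h2
    have hrN : r < N := by rw [← hSA.1]; exact h1
    have hrn : (r : Int) < n := by omega
    have hr' : r < (n - 0).toNat := by omega
    have hrowchar := pvRowB_char n (PySem.Int.floordiv n 2) (r : Int)
      (by rw [hh]) (by omega) hrn
    have hBr : (ReverseFirstQuarter_alt n)[r] = pvRowB n (PySem.Int.floordiv n 2) (r : Int) := by
      have hsome : (ReverseFirstQuarter_alt n)[r]? = some (pvRowB n (PySem.Int.floordiv n 2) (0 + (r : Int))) := by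
        rw [hB]
        simp only [List.getElem?_map, PySem.List.getElem?_pyRange_one, hr', if_pos, Option.map_some]
      rw [List.getElem?_eq_getElem h2] at hsome
      simpa using hsome
    have hrowA : (ReverseFirstQuarter n)[r].length = N :=
      hSA.2 _ (List.getElem_mem _)
    have hrowB : (ReverseFirstQuarter_alt n)[r].length = N := by
      rw [hBr, hrowchar.1]
    apply List.ext_getElem
    · rw [hrowA, hrowB]
    · intro c hc1 hc2
      have hcN : c < N := by rw [← hrowA]; exact hc1
      have hcn : (c : Int) < n := by omega
      rw [← pvCell_eq_getElem _ _ _ h1 hc1, hcellA r c, hcellA1 r c, pvZero_cell,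
        ← pvCell_eq_getElem _ _ _ h2 hc2]
      have hBrow : (ReverseFirstQuarter_alt n).getD r []
          = pvRowB n (PySem.Int.floordiv n 2) (r : Int) := by
        rw [List.getD_eq_getElem?_getD, List.getElem?_eq_getElem h2, Option.getD_some, hBr]
      unfold pvCell
      rw [hBrow, hrowchar.2 c]
      simp only [pvColsB_mem]
      -- arithmetic equivalence of the two conditions
      have hiffD : (∃ j ∈ PySem.List.pyRange (n / 2) n 1,
          (r : Int) = j ∧ (c : Int) = j) ↔ (n / 2 ≤ (r : Int) ∧ (c : Int) = (r : Int)) := by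
        constructor
        · rintro ⟨j, hj, hrj, hcj⟩
          rw [PySem.List.mem_pyRange_one] at hj
          omega
        · rintro ⟨hle, hc⟩
          exact ⟨(r : Int), by rw [PySem.List.mem_pyRange_one]; omega, rfl, by omega⟩
      have hiffS : (∃ i ∈ PySem.List.pyRange 0 (n / 2) 2,
          ((r : Int) = i ∧ (c : Int) = i + 1) ∨ ((r : Int) = i + 1 ∧ (c : Int) = i)) ↔
          (((r : Int) % 2 = 1 ∧ (r : Int) - 1 < n / 2 ∧ (c : Int) = (r : Int) - 1) ∨
            ((r : Int) % 2 = 0 ∧ (r : Int) < n / 2 ∧ (c : Int) = (r : Int) + 1)) := by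
        constructor
        · rintro ⟨i, hi, hcase⟩
          rw [PySem.List.mem_pyRange_iff_of_pos (by norm_num)] at hi
          rcases hcase with ⟨h1', h2'⟩ | ⟨h1', h2'⟩
          · right; omega
          · left; omega
        · rintro (⟨hodd, hlt, hc⟩ | ⟨heven, hlt, hc⟩)
          · refine ⟨(r : Int) - 1, ?_, Or.inr (by omega)⟩
            rw [PySem.List.mem_pyRange_iff_of_pos (by norm_num)]
            omega
          · refine ⟨(r : Int), ?_, Or.inl (by omega)⟩
            rw [PySem.List.mem_pyRange_iff_of_pos (by norm_num)]
            omega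
      rw [hh]
      by_cases hd : n / 2 ≤ (r : Int) ∧ (c : Int) = (r : Int)
      · rw [if_pos (hiffD.mpr hd), if_pos (Or.inr (Or.inl hd))]
      · rw [if_neg (fun hx => hd (hiffD.mp hx))]
        by_cases hs : ((r : Int) % 2 = 1 ∧ (r : Int) - 1 < n / 2 ∧ (c : Int) = (r : Int) - 1) ∨
            ((r : Int) % 2 = 0 ∧ (r : Int) < n / 2 ∧ (c : Int) = (r : Int) + 1)
        · rcases hs with h' | h'
          · rw [if_pos (hiffS.mpr (Or.inl h')), if_pos (Or.inl h')]
          · rw [if_pos (hiffS.mpr (Or.inr h')), if_pos (Or.inr (Or.inr h'))]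
        · rw [if_neg (fun hx => hs (hiffS.mp hx)), if_neg (by
            rintro (h' | h' | h')
            exacts [hs (Or.inl h'), hd h', hs (Or.inr h')])]
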